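-- pv_equiv track=rewrite | github.com/weniv/pyalgo100 | src/py/answer.py | solution
-- ===== SOURCE A (Python) =====
-- from collections import deque
-- from collections import deque
-- from collections import deque
-- from collections import deque
-- from collections import deque
-- from collections import deque
--
-- def solution(data):
--     max_size, nums = data
--     dq = deque(maxlen=max_size)
--     result = []
--
--     for num in nums:
--         dq.append(num)
--         result.append(list(dq))
--
--     return result
-- ===== SOURCE B (Python) =====
-- def solution(data):
--     max_size, nums = data
--     return [nums[max(0, i - max_size + 1): i + 1] for i in range(len(nums))]
-- ===== Notes on version B (the rewrite author's own statement) =====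
-- stated objective: simpler
-- what changed: Replaces the rolling bounded deque (appended to and snapshotted each step) with a direct comprehension that slices each window out of the original list by index arithmetic.
import Mathlib
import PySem

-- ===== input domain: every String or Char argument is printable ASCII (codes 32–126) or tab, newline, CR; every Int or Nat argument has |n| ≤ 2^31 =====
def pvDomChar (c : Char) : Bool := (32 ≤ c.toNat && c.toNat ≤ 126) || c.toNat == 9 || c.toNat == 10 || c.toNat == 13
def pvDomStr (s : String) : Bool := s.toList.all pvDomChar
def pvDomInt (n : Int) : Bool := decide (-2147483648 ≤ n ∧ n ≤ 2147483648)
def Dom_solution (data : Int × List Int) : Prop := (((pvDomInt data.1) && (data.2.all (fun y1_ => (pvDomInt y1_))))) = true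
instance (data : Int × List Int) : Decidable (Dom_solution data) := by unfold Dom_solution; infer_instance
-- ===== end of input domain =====

-- B replaces A's rolling bounded deque (snapshotted each step) with direct index-arithmetic slices; objective: simpler.


-- ===== PORT A =====
-- deque(maxlen=m).append(x): append, and if the length now exceeds m drop the leftmost element
def solDqAppend (m : Int) (dq : List Int) (x : Int) : List Int :=
  let d := dq ++ [x]
  if m < (d.length : Int) then d.drop 1 else d

def solution (data : Int × List Int) : List (List Int) :=
  let m := data.1
  let nums := data.2
  (nums.foldl
    (fun (st : List Int × List (List Int)) num =>
      let dq := solDqAppend m st.1 num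
      (dq, st.2 ++ [dq]))
    ([], [])).2

-- ===== PORT B =====
def solution_alt (data : Int × List Int) : List (List Int) :=
  let m := data.1
  let nums := data.2
  (List.range nums.length).map (fun (i : Nat) =>
    PySem.List.slice nums (some (max 0 ((i : Int) - m + 1))) (some ((i : Int) + 1)))

-- ===== PRECONDITION & SPEC =====
-- deque(maxlen=max_size) raises ValueError for a negative max_size; Pre_ excludes exactly those inputs.
def Pre_solution (data : Int × List Int) : Prop := 0 ≤ data.1
instance (data : Int × List Int) : Decidable (Pre_solution data) := by unfold Pre_solution; infer_instance
def pvWitness_solution : (Int × List Int) := (2, [1, 2, 3, 4])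

def Spec_solution (data : Int × List Int) (out : List (List Int)) : Prop := out = solution_alt data
instance (data : Int × List Int) (out : List (List Int)) : Decidable (Spec_solution data out) := by unfold Spec_solution; infer_instance

-- ===== CLAIM (what is proved, stated in full; the proofs are below) =====
def Claim_equal_solution : Prop := ∀ (data : Int × List Int), Dom_solution data → Pre_solution data → Spec_solution data (solution data)

-- ===== LEMMAS AND PROOFS =====

-- the last min(m, |xs|) elements of xs: the deque contents after pushing all of xs
def solWnd (m : Int) (xs : List Int) : List Int := xs.drop (xs.length - m.toNat)

lemma solDqAppend_wnd (m : Int) (hm : 0 ≤ m) (xs : List Int) (x : Int) :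
    solDqAppend m (solWnd m xs) x = solWnd m (xs ++ [x]) := by
  obtain ⟨t, rfl⟩ := Int.eq_ofNat_of_zero_le hm
  unfold solDqAppend solWnd
  simp only [List.length_append, List.length_drop, List.length_cons, List.length_nil,
    Int.toNat_natCast]
  by_cases h : t ≤ xs.length
  · rw [if_pos (by push_cast; omega)]
    by_cases h0 : t = 0
    · subst h0
      simp
    · rw [List.drop_append_of_le_length (by rw [List.length_drop]; omega), List.drop_drop,
          List.drop_append_of_le_length (by omega),
          show xs.length - t + 1 = xs.length + (0 + 1) - t by omega]
  · rw [if_neg (by push_cast; omega)]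
    rw [Nat.sub_eq_zero_of_le (by omega), Nat.sub_eq_zero_of_le (by omega)]
    simp

lemma sol_inv (m : Int) (hm : 0 ≤ m) (nums : List Int) :
    ∀ (pref : List Int) (acc : List (List Int)),
    nums.foldl
      (fun (st : List Int × List (List Int)) num =>
        (solDqAppend m st.1 num, st.2 ++ [solDqAppend m st.1 num]))
      (solWnd m pref, acc)
    = (solWnd m (pref ++ nums),
       acc ++ (List.range nums.length).map (fun i => solWnd m (pref ++ nums.take (i + 1)))) := by
  induction nums with
  | nil => intro pref acc; simp
  | cons x xs ih =>
    intro pref acc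
    simp only [List.foldl_cons]
    rw [solDqAppend_wnd m hm pref x]
    rw [ih (pref ++ [x]) (acc ++ [solWnd m (pref ++ [x])])]
    simp only [List.length_cons, List.range_succ_eq_map, List.map_cons, List.map_map,
      List.take_succ_cons, List.take_zero, List.append_assoc, List.cons_append,
      List.nil_append]
    simp [Function.comp_def, Nat.succ_eq_add_one]

lemma sol_slice_eq_wnd (m : Int) (hm : 0 ≤ m) (nums : List Int) (i : Nat) (hi : i < nums.length) :
    PySem.List.slice nums (some (max 0 ((i : Int) - m + 1))) (some ((i : Int) + 1))
      = solWnd m (nums.take (i + 1)) := by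
  rw [PySem.List.slice_toNat nums (le_max_left _ _) (by omega)]
  unfold solWnd
  have hlen : (nums.take (i + 1)).length = i + 1 := by
    rw [List.length_take]; omega
  rw [hlen, List.drop_take]
  rw [show ((i : Int) + 1).toNat = i + 1 by omega,
      show (max 0 ((i : Int) - m + 1)).toNat = (i + 1) - m.toNat by omega]

-- ===== VERDICT (by name: the statement is the Claim_ definition above) =====
theorem solution_spec : Claim_equal_solution := by
  intro data _ hpre
  obtain ⟨m, nums⟩ := data
  unfold Spec_solution solution solution_alt
  have h0 : solWnd m ([] : List Int) = [] := by simp [solWnd]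
  simp only []
  rw [show (([], []) : List Int × List (List Int)) = (solWnd m [], []) by simp [solWnd]]
  rw [sol_inv m hpre nums [] []]
  simp only [List.nil_append]
  exact List.map_congr_left (fun i hi => (sol_slice_eq_wnd m hpre nums i (List.mem_range.mp hi)).symm)
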